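-- pv_equiv track=rewrite | github.com/ByungKwanLee/MoAI | moai/sgg/utils.py | label_duplicates
-- ===== SOURCE A (Python) =====
-- def label_duplicates(lst):
--     duplicates_count = {}
--
--     labeled_list = []
--
--     for item in lst:
--         if lst.count(item) > 1:
--             if item not in duplicates_count:
--                 duplicates_count[item] = 1
--             else:
--                 duplicates_count[item] += 1
--             labeled_list.append(f"{item} (#{duplicates_count[item]})")
--         else:
--             labeled_list.append(item)
--
--     return labeled_list
-- ===== SOURCE B (Python) =====
-- def label_duplicates(lst):
--     idx = {}
--     for i, x in enumerate(lst):
--         idx.setdefault(x, []).append(i)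
--     result = list(lst)
--     for x, ps in idx.items():
--         if len(ps) > 1:
--             for n, i in enumerate(ps, 1):
--                 result[i] = f"{x} (#{n})"
--     return result
-- ===== Notes on version B (the rewrite author's own statement) =====
-- stated objective: faster
-- what changed: B builds an index table (item -> list of positions) in one pass, copies the list, and then overwrites positions group by group with occurrence numbers, instead of A's per-element lst.count rescans with a running counter dict.
import Mathlib
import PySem

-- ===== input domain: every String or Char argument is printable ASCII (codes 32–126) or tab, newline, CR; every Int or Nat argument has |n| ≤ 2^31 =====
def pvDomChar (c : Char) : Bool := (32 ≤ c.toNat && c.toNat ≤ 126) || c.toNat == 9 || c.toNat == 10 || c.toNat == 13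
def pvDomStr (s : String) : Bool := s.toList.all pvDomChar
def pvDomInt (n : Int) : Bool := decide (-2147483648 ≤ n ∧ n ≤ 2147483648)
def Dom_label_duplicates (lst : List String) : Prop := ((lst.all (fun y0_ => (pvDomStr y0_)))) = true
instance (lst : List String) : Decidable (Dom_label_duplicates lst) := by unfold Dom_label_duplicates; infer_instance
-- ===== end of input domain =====

-- B builds an index table (item -> positions) in one pass and overwrites a copy of the
-- list group by group, instead of A's per-element lst.count rescans; return values identical.

-- ===== PORT A =====
-- literal transliteration of A: one loop carrying (duplicates_count, labeled_list)
def label_duplicates (lst : List String) : List String :=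
  (lst.foldl (fun (st : PySem.Dict String Int × List String) item =>
      if PySem.List.count lst item > 1 then
        let d := if st.1.contains item = false
                   then st.1.insert item 1
                   else st.1.insert item (st.1.getD item 0 + 1)
        (d, st.2 ++ [item ++ " (#" ++ PySem.Int.toStr (d.getD item 0) ++ ")"])
      else
        (st.1, st.2 ++ [item]))
    (PySem.Dict.empty, [])).2

-- ===== PORT B =====
-- literal transliteration of Source B: index-table pass, then positional overwrites on a copy.
-- positions come from enumerate(lst) so they are ≥ 0: '.toNat' is exact here (no negative index).
def label_duplicates_alt (lst : List String) : List String :=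
  let idx := (PySem.List.enumerate lst).foldl
      (fun (d : PySem.Dict String (List Int)) p => d.modify p.2 [] (fun ps => ps ++ [p.1]))
      PySem.Dict.empty
  idx.items.foldl (fun res (p : String × List Int) =>
    if p.2.length > 1 then
      (PySem.List.enumerate p.2 1).foldl
        (fun r q => r.set q.2.toNat (p.1 ++ " (#" ++ PySem.Int.toStr q.1 ++ ")")) res
    else res) lst

-- ===== PRECONDITION & SPEC =====
def Spec_label_duplicates (lst : List String) (out : List String) : Prop := out = label_duplicates_alt lst
instance (lst : List String) (out : List String) : Decidable (Spec_label_duplicates lst out) := by unfold Spec_label_duplicates; infer_instance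

-- ===== CLAIM (what is proved, stated in full; the proofs are below) =====
def Claim_equal_label_duplicates : Prop := ∀ (lst : List String), Dom_label_duplicates lst → Spec_label_duplicates lst (label_duplicates lst)

-- ===== LEMMAS AND PROOFS =====

-- the label string
def pvLab (x : String) (n : Int) : String := x ++ " (#" ++ PySem.Int.toStr n ++ ")"

-- reference result of A: for each element, label by its prefix-occurrence count
def pvRef (cnt : String → Nat) : List String → List String → List String
  | _, [] => []
  | pre, x :: r =>
      (if cnt x > 1 then pvLab x ((pre.count x : Int) + 1) else x)
        :: pvRef cnt (pre ++ [x]) r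

-- positions (as Python ints) of x in l, where l starts at global index s
def pvPos (s : Int) (l : List String) (x : String) : List Int :=
  ((PySem.List.enumerate l s).filter (fun p => p.2 == x)).map Prod.fst

-- ---- A side ----
lemma A_side (lst : List String) (rest pre : List String) (d : PySem.Dict String Int)
    (acc : List String)
    (hinv : ∀ x, PySem.List.count lst x > 1 → d.getD x 0 = (pre.count x : Int)) :
    (rest.foldl (fun (st : PySem.Dict String Int × List String) item =>
      if PySem.List.count lst item > 1 then
        let d := if st.1.contains item = false
                   then st.1.insert item 1
                   else st.1.insert item (st.1.getD item 0 + 1)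
        (d, st.2 ++ [item ++ " (#" ++ PySem.Int.toStr (d.getD item 0) ++ ")"])
      else
        (st.1, st.2 ++ [item]))
      (d, acc)).2 = acc ++ pvRef (fun x => PySem.List.count lst x) pre rest := by
  induction rest generalizing pre d acc with
  | nil => simp [pvRef]
  | cons x r ih =>
    by_cases hc : PySem.List.count lst x > 1
    all_goals have hc' := hc
    all_goals rw [PySem.List.count_eq] at hc'
    · have hupd : (if d.contains x = false then d.insert x 1
                   else d.insert x (d.getD x 0 + 1)) = d.insert x ((pre.count x : Int) + 1) := by
        by_cases h : d.contains x = false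
        · have h0 : d.getD x 0 = 0 := PySem.Dict.getD_of_not_contains d 0 h
          have hz : (pre.count x : Int) = 0 := by rw [← hinv x hc, h0]
          rw [if_pos h, hz]; norm_num
        · rw [if_neg h, hinv x hc]
      simp only [List.foldl_cons, if_pos hc, hupd]
      rw [ih (pre ++ [x]) _ _ ?_]
      · simp [pvRef, hc', pvLab, PySem.Dict.getD_insert_self]
      · intro y hy1
        by_cases hy : y = x
        · subst hy; simp [PySem.Dict.getD_insert_self, List.count_append]
        · rw [PySem.Dict.getD_insert_of_ne _ _ _ hy]
          simp [hinv y hy1, List.count_append, Ne.symm hy]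
    · simp only [List.foldl_cons, if_neg hc]
      rw [ih (pre ++ [x]) d _ ?_]
      · simp [pvRef, hc']
      · intro y hy1
        by_cases hy : y = x
        · exact absurd (hy ▸ hy1) hc
        · simp [hinv y hy1, List.count_append, Ne.symm hy]

lemma pvRef_length (cnt : String → Nat) (pre rest : List String) :
    (pvRef cnt pre rest).length = rest.length := by
  induction rest generalizing pre with
  | nil => rfl
  | cons x r ih => simp [pvRef, ih]

lemma pvRef_getElem? (cnt : String → Nat) (pre rest : List String) (j : Nat)
    (h : j < rest.length) :
    (pvRef cnt pre rest)[j]? =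
      some (if cnt rest[j] > 1
            then pvLab rest[j] (((pre ++ rest.take j).count rest[j] : Nat) + 1)
            else rest[j]) := by
  induction rest generalizing pre j with
  | nil => simp at h
  | cons y r ih =>
    cases j with
    | zero => simp [pvRef]
    | succ j =>
      have h' : j < r.length := by simpa using h
      rw [pvRef, List.getElem?_cons_succ, ih (pre ++ [y]) j h']
      simp [List.take_succ_cons, List.append_assoc]

-- ---- B side: the index table ----
lemma idx_getD (es : List (Int × String)) (d : PySem.Dict String (List Int)) (x : String) :
    (es.foldl (fun d p => d.modify p.2 [] (fun ps => ps ++ [p.1])) d).getD x []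
      = d.getD x [] ++ (es.filter (fun p => p.2 == x)).map Prod.fst := by
  induction es generalizing d with
  | nil => simp
  | cons p es ih =>
    obtain ⟨i, y⟩ := p
    rw [List.foldl_cons, ih]
    by_cases hxy : y = x
    · subst hxy
      simp [PySem.Dict.getD_modify_self]
    · rw [PySem.Dict.getD_modify_of_ne]
      · simp [hxy]
      · exact fun hh => hxy hh.symm

lemma pos_mem (s : Int) (l : List String) (x : String) (i : Int) (hi : i ∈ pvPos s l x) :
    ∃ (k : Nat) (hk : k < l.length), i = s + k ∧ l[k] = x := by
  unfold pvPos at hi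
  simp only [List.mem_map, List.mem_filter] at hi
  obtain ⟨⟨a, b⟩, ⟨hmem, hb⟩, rfl⟩ := hi
  rw [PySem.List.mem_enumerate_iff] at hmem
  obtain ⟨k, hk, heq⟩ := hmem
  cases heq
  refine ⟨k, hk, rfl, ?_⟩
  simpa using hb

lemma pos_length (s : Int) (l : List String) (x : String) :
    (pvPos s l x).length = l.count x := by
  induction l generalizing s with
  | nil => rfl
  | cons y l ih =>
    simp only [pvPos, PySem.List.enumerate_cons, List.filter_cons] at *
    by_cases hxy : y = x <;> simp [hxy, ih (s + 1)]

lemma pos_split (lst : List String) (x : String) (j : Nat) (hj : j < lst.length)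
    (hx : lst[j] = x) :
    pvPos 0 lst x = pvPos 0 (lst.take j) x ++ (j : Int) :: pvPos ((j : Int) + 1) (lst.drop (j + 1)) x := by
  have hlen : (lst.take j).length = j := by rw [List.length_take]; omega
  conv_lhs => rw [pvPos, ← List.take_append_drop j lst, List.drop_eq_getElem_cons hj]
  rw [PySem.List.enumerate_append, PySem.List.enumerate_cons]
  simp [pvPos, hlen, hx, List.filter_append]

-- ---- B side: set-update folds ----
lemma set_fold_len (F : Int × Int → String) (qs : List (Int × Int)) (res : List String) :
    (qs.foldl (fun r q => r.set q.2.toNat (F q)) res).length = res.length := by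
  induction qs generalizing res with
  | nil => rfl
  | cons q qs ih => simp [ih]

lemma set_fold_untouched (F : Int × Int → String) (qs : List (Int × Int)) (res : List String)
    (j : Nat) (hj : ∀ q ∈ qs, q.2.toNat ≠ j) :
    (qs.foldl (fun r q => r.set q.2.toNat (F q)) res)[j]? = res[j]? := by
  induction qs generalizing res with
  | nil => rfl
  | cons q qs ih =>
    rw [List.foldl_cons, ih _ (fun q hq => hj q (List.mem_cons_of_mem _ hq))]
    exact List.getElem?_set_ne (hj q (List.mem_cons_self ..))

lemma set_fold_at (F : Int × Int → String) (qs1 qs2 : List (Int × Int)) (q0 : Int × Int)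
    (res : List String) (j : Nat) (hq : q0.2.toNat = j) (hj : j < res.length)
    (h2 : ∀ q ∈ qs2, q.2.toNat ≠ j) :
    ((qs1 ++ q0 :: qs2).foldl (fun r q => r.set q.2.toNat (F q)) res)[j]? = some (F q0) := by
  rw [List.foldl_append, List.foldl_cons, set_fold_untouched F qs2 _ j h2, hq]
  have hlen : (qs1.foldl (fun r q => r.set q.2.toNat (F q)) res).length = res.length :=
    set_fold_len F qs1 res
  exact List.getElem?_set_eq_of_lt _ (by omega)

-- one item's pass over result
lemma item_step (lst : List String) (x : String) (res : List String)
    (hlen : res.length = lst.length) :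
    ((if (pvPos 0 lst x).length > 1 then
        (PySem.List.enumerate (pvPos 0 lst x) 1).foldl
          (fun r q => r.set q.2.toNat (x ++ " (#" ++ PySem.Int.toStr q.1 ++ ")")) res
      else res).length = lst.length) ∧
    (∀ (j : Nat) (h : j < lst.length),
      (if (pvPos 0 lst x).length > 1 then
        (PySem.List.enumerate (pvPos 0 lst x) 1).foldl
          (fun r q => r.set q.2.toNat (x ++ " (#" ++ PySem.Int.toStr q.1 ++ ")")) res
      else res)[j]? =
        if lst[j] = x ∧ lst.count x > 1
        then some (pvLab x (((lst.take j).count x : Nat) + 1))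
        else res[j]?) := by
  by_cases hgt : (pvPos 0 lst x).length > 1
  · simp only [if_pos hgt]
    refine ⟨(set_fold_len _ _ _).trans hlen, ?_⟩
    intro j h
    by_cases hx : lst[j] = x
    · have hcnt : lst.count x > 1 := by rw [← pos_length 0 lst x]; exact hgt
      rw [if_pos ⟨hx, hcnt⟩, pos_split lst x j h hx,
        PySem.List.enumerate_append, PySem.List.enumerate_cons]
      rw [set_fold_at _ _ _ _ _ j (by omega) (by omega) ?_]
      · simp [pvLab, pos_length, add_comm]
      · intro q hq
        rw [PySem.List.mem_enumerate_iff] at hq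
        obtain ⟨k, hk, rfl⟩ := hq
        obtain ⟨k', hk', hik, -⟩ :=
          pos_mem _ _ _ _ (List.getElem_mem hk)
        simp only [hik]
        omega
    · rw [if_neg (fun hh => hx hh.1)]
      apply set_fold_untouched
      intro q hq
      rw [PySem.List.mem_enumerate_iff] at hq
      obtain ⟨k, hk, rfl⟩ := hq
      obtain ⟨k', hk', hik, hxx⟩ :=
        pos_mem _ _ _ _ (List.getElem_mem hk)
      simp only [hik]
      intro hEq
      apply hx
      have hkj : k' = j := by omega
      exact hkj ▸ hxx
  · simp only [if_neg hgt]
    refine ⟨hlen, ?_⟩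
    intro j h
    rw [if_neg ?_]
    rintro ⟨h1, h2⟩
    rw [pos_length] at hgt
    omega

-- the outer fold over the grouped items
lemma outer_fold (lst : List String) (ks : List String) (res : List String)
    (hlen : res.length = lst.length) :
    (((ks.map (fun x => (x, pvPos 0 lst x))).foldl (fun res (p : String × List Int) =>
        if p.2.length > 1 then
          (PySem.List.enumerate p.2 1).foldl
            (fun r q => r.set q.2.toNat (p.1 ++ " (#" ++ PySem.Int.toStr q.1 ++ ")")) res
        else res) res).length = lst.length) ∧
    (∀ (j : Nat) (h : j < lst.length),
      ((ks.map (fun x => (x, pvPos 0 lst x))).foldl (fun res (p : String × List Int) =>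
        if p.2.length > 1 then
          (PySem.List.enumerate p.2 1).foldl
            (fun r q => r.set q.2.toNat (p.1 ++ " (#" ++ PySem.Int.toStr q.1 ++ ")")) res
        else res) res)[j]? =
        if lst[j] ∈ ks ∧ lst.count lst[j] > 1
        then some (pvLab lst[j] (((lst.take j).count lst[j] : Nat) + 1))
        else res[j]?) := by
  induction ks generalizing res with
  | nil => exact ⟨hlen, fun j h => by simp⟩
  | cons x ks ih =>
    simp only [List.map_cons, List.foldl_cons]
    obtain ⟨hl1, hv1⟩ := item_step lst x res hlen
    obtain ⟨hl2, hv2⟩ := ih _ hl1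
    refine ⟨hl2, ?_⟩
    intro j h
    rw [hv2 j h, hv1 j h]
    by_cases hx : lst[j] = x
    · subst hx
      by_cases hc : 1 < lst.count lst[j]
      · by_cases hk : lst[j] ∈ ks <;> simp [hk, hc, List.mem_cons]
      · simp [hc, List.mem_cons]
    · simp [hx, List.mem_cons]

lemma B_char (lst : List String) :
    (label_duplicates_alt lst).length = lst.length ∧
    (∀ (j : Nat) (h : j < lst.length),
      (label_duplicates_alt lst)[j]? =
        if lst.count lst[j] > 1
        then some (pvLab lst[j] (((lst.take j).count lst[j] : Nat) + 1))
        else some lst[j]) := by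
  have hitems : ((PySem.List.enumerate lst).foldl
      (fun (d : PySem.Dict String (List Int)) p => d.modify p.2 [] (fun ps => ps ++ [p.1]))
      PySem.Dict.empty).items
      = (PySem.Set.ofList lst).map (fun x => (x, pvPos 0 lst x)) := by
    have hkeys : ((PySem.List.enumerate lst).foldl
        (fun (d : PySem.Dict String (List Int)) p => d.modify p.2 [] (fun ps => ps ++ [p.1]))
        PySem.Dict.empty).keys = PySem.Set.ofList lst := by
      rw [PySem.Dict.keys_foldl_modify_key]
      simp [PySem.List.map_snd_enumerate, PySem.Set.update, PySem.Set.ofList_eq_foldl]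
    have hnodup := hkeys ▸ PySem.Set.nodup_ofList lst
    rw [PySem.Dict.items_eq_map_keys _ hnodup [], hkeys]
    apply List.map_congr_left
    intro x hx
    rw [idx_getD]
    simp [PySem.Dict.getD_empty, pvPos]
  simp only [label_duplicates_alt]
  rw [hitems]
  obtain ⟨hl, hv⟩ := outer_fold lst (PySem.Set.ofList lst) lst rfl
  refine ⟨hl, ?_⟩
  intro j h
  rw [hv j h]
  have hjm : lst[j] ∈ PySem.Set.ofList lst := by
    rw [PySem.Set.mem_ofList]; exact List.getElem_mem h
  by_cases hc : lst.count lst[j] > 1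
  · simp [hc, hjm]
  · simp [hc, List.getElem?_eq_getElem h]

-- ===== VERDICT (by name: the statement is the Claim_ definition above) =====
theorem label_duplicates_spec : Claim_equal_label_duplicates := by
  intro lst _
  unfold Spec_label_duplicates
  have hA : label_duplicates lst = pvRef (fun x => PySem.List.count lst x) [] lst := by
    unfold label_duplicates
    have := A_side lst lst [] PySem.Dict.empty []
      (by intro x _; simp [PySem.Dict.getD_empty])
    simpa using this
  obtain ⟨hBl, hBv⟩ := B_char lst
  apply List.ext_getElem?
  intro j
  by_cases h : j < lst.length
  · rw [hA, pvRef_getElem? _ [] lst j h, hBv j h]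
    have hcnt : PySem.List.count lst lst[j] = lst.count lst[j] := PySem.List.count_eq ..
    by_cases hc : lst.count lst[j] > 1
    · simp [hc]
    · simp [hc]
  · have h1 : (label_duplicates lst).length = lst.length := by rw [hA, pvRef_length]
    rw [List.getElem?_eq_none (by omega), List.getElem?_eq_none (by omega)]
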